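-- pv_equiv track=rewrite | github.com/Adamouization/POS-Tagging-and-Unknown-Words | src/main.py | count_tag_transition_occurrences_new
-- ===== SOURCE A (Python) =====
-- def count_tag_transition_occurrences_new(tags: list) -> dict:
--     tag_transition_occurrences = dict()
--
--     # Loop through each tag in the sentence.
--     current_tag, previous_tag = (str(),) * 2
--     for i, tag in enumerate(tags):
--         if i == 0:  # Special case: first tagged token does not have any preceding token.
--             current_tag = tag
--         else:
--             previous_tag = current_tag
--             current_tag = tag
--
--             # Create a new nested current tag dict in the dictionary.
--             if current_tag not in tag_transition_occurrences.keys():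
--                 tag_transition_occurrences[current_tag] = dict()
--
--             # Create a new preceding tag value in the nested dict.
--             if previous_tag not in tag_transition_occurrences[current_tag].keys():
--                 tag_transition_occurrences[current_tag][previous_tag] = 0
--
--             # Increment the occurrence once we are sure that the keys are correctly created in the dict.
--             tag_transition_occurrences[current_tag][previous_tag] += 1
--
--     return tag_transition_occurrences
-- ===== SOURCE B (Python) =====
-- def count_tag_transition_occurrences_new(tags: list) -> dict:
--     # Stage 1: flat tally of adjacent (previous, current) transitions.
--     flat = {}
--     for pair in zip(tags, tags[1:]):
--         flat[pair] = flat.get(pair, 0) + 1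
--     # Stage 2: reshape the flat tally into the nested dict.
--     result = {}
--     for (previous, current), n in flat.items():
--         result.setdefault(current, {})[previous] = n
--     return result
-- ===== Notes on version B (the rewrite author's own statement) =====
-- stated objective: alternative
-- what changed: Replaces A's single indexed pass with explicit previous/current state tracking by two distinct stages: a flat tally of zip-adjacent (previous, current) pairs, then a separate reshape pass building the nested dict from that flat mapping.
import Mathlib
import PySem

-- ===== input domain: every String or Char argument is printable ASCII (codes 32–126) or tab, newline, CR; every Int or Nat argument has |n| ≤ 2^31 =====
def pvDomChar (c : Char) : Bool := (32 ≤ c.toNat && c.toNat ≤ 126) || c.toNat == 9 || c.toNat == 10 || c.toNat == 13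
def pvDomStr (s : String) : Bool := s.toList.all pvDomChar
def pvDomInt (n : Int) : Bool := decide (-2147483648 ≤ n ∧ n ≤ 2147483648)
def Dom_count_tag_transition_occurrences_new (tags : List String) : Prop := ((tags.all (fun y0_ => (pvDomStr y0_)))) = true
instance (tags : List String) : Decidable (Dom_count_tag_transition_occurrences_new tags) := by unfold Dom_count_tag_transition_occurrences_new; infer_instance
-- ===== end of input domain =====

-- B replaces A's single indexed pass with previous/current state tracking by two distinct stages:
-- a flat tally of adjacent (previous, current) pairs, then a separate reshape pass into the
-- nested dict (objective: alternative decomposition, same cost).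

-- ===== PORT A =====
-- loop body of A (state = (current_tag, previous_tag, nested dict); item = (i, tag))
def pvAStep (s : String × String × PySem.Dict String (PySem.Dict String Int))
    (it : Int × String) : String × String × PySem.Dict String (PySem.Dict String Int) :=
  if it.1 == 0 then (it.2, s.2.1, s.2.2)
  else
    let previous_tag := s.1
    let current_tag := it.2
    let d := s.2.2
    let d := if d.contains current_tag = false then d.insert current_tag PySem.Dict.empty else d
    let d := if (d.getD current_tag PySem.Dict.empty).contains previous_tag = false then
               d.insert current_tag ((d.getD current_tag PySem.Dict.empty).insert previous_tag 0)
             else d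
    let d := d.insert current_tag ((d.getD current_tag PySem.Dict.empty).insert previous_tag
               ((d.getD current_tag PySem.Dict.empty).getD previous_tag 0 + 1))
    (current_tag, previous_tag, d)

def count_tag_transition_occurrences_new (tags : List String) : List (String × List (String × Int)) :=
  (((PySem.List.enumerate tags 0).foldl pvAStep ("", "", PySem.Dict.empty)).2.2).items.map
    (fun q => (q.1, q.2.items))

-- ===== PORT B =====
-- stage 1 loop body: flat[pair] = flat.get(pair, 0) + 1
def pvPairStep (d : PySem.Dict (String × String) Int) (p : String × String) :
    PySem.Dict (String × String) Int :=
  d.insert p (d.getD p 0 + 1)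

-- stage 2 loop body: result.setdefault(current, {})[previous] = n
def pvNestStep (r : PySem.Dict String (PySem.Dict String Int)) (e : (String × String) × Int) :
    PySem.Dict String (PySem.Dict String Int) :=
  let r := r.setdefault e.1.2 PySem.Dict.empty
  r.insert e.1.2 ((r.getD e.1.2 PySem.Dict.empty).insert e.1.1 e.2)

def count_tag_transition_occurrences_new_alt (tags : List String) : List (String × List (String × Int)) :=
  let pairs := tags.zip (PySem.List.slice tags (some 1) none)
  let flat := pairs.foldl pvPairStep PySem.Dict.empty
  let result := flat.items.foldl pvNestStep PySem.Dict.empty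
  result.items.map (fun q => (q.1, q.2.items))

-- ===== PRECONDITION & SPEC =====
def Spec_count_tag_transition_occurrences_new (tags : List String) (out : List (String × List (String × Int))) : Prop := out = count_tag_transition_occurrences_new_alt tags
instance (tags : List String) (out : List (String × List (String × Int))) : Decidable (Spec_count_tag_transition_occurrences_new tags out) := by unfold Spec_count_tag_transition_occurrences_new; infer_instance

-- ===== CLAIM (what is proved, stated in full; the proofs are below) =====
def Claim_equal_count_tag_transition_occurrences_new : Prop := ∀ (tags : List String), Dom_count_tag_transition_occurrences_new tags → Spec_count_tag_transition_occurrences_new tags (count_tag_transition_occurrences_new tags)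

-- ===== LEMMAS AND PROOFS =====

-- canonical forms of the two loop bodies
def pvSA (d : PySem.Dict String (PySem.Dict String Int)) (p : String × String) :
    PySem.Dict String (PySem.Dict String Int) :=
  d.insert p.2 ((d.getD p.2 PySem.Dict.empty).insert p.1
    ((d.getD p.2 PySem.Dict.empty).getD p.1 0 + 1))

def pvSB (r : PySem.Dict String (PySem.Dict String Int)) (e : (String × String) × Int) :
    PySem.Dict String (PySem.Dict String Int) :=
  r.insert e.1.2 ((r.getD e.1.2 PySem.Dict.empty).insert e.1.1 e.2)

def pvReshape (c : PySem.Dict (String × String) Int) : PySem.Dict String (PySem.Dict String Int) :=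
  c.items.foldl pvSB PySem.Dict.empty

-- A's else-branch is pvSA
lemma pvAStep_ne (s : String × String × PySem.Dict String (PySem.Dict String Int))
    (it : Int × String) (h : (it.1 == 0) = false) :
    pvAStep s it = (it.2, s.1, pvSA s.2.2 (s.1, it.2)) := by
  unfold pvAStep pvSA
  rw [h]
  simp only [Bool.false_eq_true, if_false]
  by_cases hc : s.2.2.contains it.2 = true
  · simp only [hc, Bool.true_eq_false, if_false]
    by_cases hp : (s.2.2.getD it.2 PySem.Dict.empty).contains s.1 = true
    · simp [hp]
    · simp only [Bool.not_eq_true] at hp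
      simp [hp, PySem.Dict.getD_insert_self, PySem.Dict.insert_insert_self,
        PySem.Dict.getD_of_not_contains _ _ hp]
  · simp only [Bool.not_eq_true] at hc
    simp [hc, PySem.Dict.getD_insert_self, PySem.Dict.insert_insert_self,
      PySem.Dict.getD_of_not_contains _ _ hc, PySem.Dict.getD_empty, PySem.Dict.contains_empty]

-- B's stage-2 body is pvSB
lemma pvNestStep_eq (r : PySem.Dict String (PySem.Dict String Int)) (e : (String × String) × Int) :
    pvNestStep r e = pvSB r e := by
  unfold pvNestStep pvSB
  by_cases hc : r.contains e.1.2 = true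
  · simp [PySem.Dict.setdefault_of_contains _ _ hc]
  · simp only [Bool.not_eq_true] at hc
    simp [PySem.Dict.setdefault_of_not_contains _ _ hc,
      PySem.Dict.getD_insert_self, PySem.Dict.insert_insert_self,
      PySem.Dict.getD_of_not_contains _ _ hc]

-- A's enumerate loop, from index ≥ 1, folds pvSA over the adjacent pairs
lemma pvA_loop (l : List String) (i : Int) (cur prev : String)
    (d : PySem.Dict String (PySem.Dict String Int)) (hi : 1 ≤ i) :
    ((PySem.List.enumerate l i).foldl pvAStep (cur, prev, d)).2.2
      = ((cur :: l).zip l).foldl pvSA d := by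
  induction l generalizing i cur prev d with
  | nil => rfl
  | cons t l ih =>
    rw [PySem.List.enumerate_cons, List.foldl_cons,
      pvAStep_ne (cur, prev, d) (i, t) (by simp; omega)]
    rw [List.zip_cons_cons, List.foldl_cons]
    exact ih (i + 1) t cur (pvSA d (cur, t)) (by omega)

-- value characterisation of the reshape fold
lemma pvReshape_getD (l : List ((String × String) × Int))
    (r : PySem.Dict String (PySem.Dict String Int)) (k : String) :
    (l.foldl pvSB r).getD k PySem.Dict.empty
      = (l.filter (fun e => e.1.2 == k)).foldl
          (fun inner e => inner.insert e.1.1 e.2) (r.getD k PySem.Dict.empty) := by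
  induction l generalizing r with
  | nil => rfl
  | cons e l ih =>
    rw [List.foldl_cons, ih (pvSB r e), List.filter_cons]
    by_cases he : (e.1.2 == k) = true
    · rw [he]
      simp only [if_true, List.foldl_cons]
      congr 1
      unfold pvSB
      rw [eq_of_beq he, PySem.Dict.getD_insert_self]
    · simp only [he, Bool.false_eq_true, if_false]
      congr 1
      unfold pvSB
      rw [PySem.Dict.getD_insert_of_ne]
      intro hkk; exact he (by rw [hkk]; exact beq_self_eq_true e.1.2)

-- keys of the reshape fold
lemma pvReshape_keys (l : List ((String × String) × Int))
    (r : PySem.Dict String (PySem.Dict String Int)) :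
    (l.foldl pvSB r).keys = PySem.Set.update r.keys (l.map (fun e => e.1.2)) := by
  have h : pvSB = fun d (x : (String × String) × Int) =>
      d.insert x.1.2 ((fun (d : PySem.Dict String (PySem.Dict String Int)) (x : (String × String) × Int) => ((d.getD x.1.2 PySem.Dict.empty).insert x.1.1 x.2)) d x) := rfl
  rw [h, PySem.Dict.keys_foldl_insert_key]

lemma pvReshape_nodup (l : List ((String × String) × Int))
    (r : PySem.Dict String (PySem.Dict String Int)) (h : r.keys.Nodup) :
    (l.foldl pvSB r).keys.Nodup := by
  have he : pvSB = fun d (x : (String × String) × Int) =>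
      d.insert x.1.2 ((fun (d : PySem.Dict String (PySem.Dict String Int)) (x : (String × String) × Int) => ((d.getD x.1.2 PySem.Dict.empty).insert x.1.1 x.2)) d x) := rfl
  rw [he]; exact PySem.Dict.nodup_keys_foldl_insert_key _ _ _ _ h

-- two nested dicts with the same keys and the same value at every key are equal
lemma pvDictEq (d d' : PySem.Dict String (PySem.Dict String Int))
    (hd : d.keys.Nodup) (hk : d.keys = d'.keys)
    (hg : ∀ k, d.getD k PySem.Dict.empty = d'.getD k PySem.Dict.empty) : d = d' := by
  apply PySem.Dict.ext
  rw [PySem.Dict.items_eq_map_keys d hd PySem.Dict.empty,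
    PySem.Dict.items_eq_map_keys d' (hk ▸ hd) PySem.Dict.empty, ← hk]
  exact List.map_congr_left (fun k _ => by rw [hg k])

-- inner-fold keys
lemma pvInner_keys (l : List ((String × String) × Int)) (d : PySem.Dict String Int) :
    (l.foldl (fun inner e => inner.insert e.1.1 e.2) d).keys
      = PySem.Set.update d.keys (l.map (fun e => e.1.1)) := by
  have h : (fun (inner : PySem.Dict String Int) (e : (String × String) × Int) => inner.insert e.1.1 e.2)
      = fun d x => d.insert x.1.1 ((fun (_ : PySem.Dict String Int) (x : (String × String) × Int) => x.2) d x) := rfl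
  rw [h, PySem.Dict.keys_foldl_insert_key]

lemma pvSetUpdateNil (l : List String) : PySem.Set.update ([] : PySem.Set String) l = PySem.Set.ofList l := by
  rw [PySem.Set.ofList_eq_foldl]; rfl

-- firsts of the cur-filtered items are distinct when keys are
lemma pvFstNodup (c : PySem.Dict (String × String) Int) (cur : String) (hnd : c.keys.Nodup) :
    ((c.items.filter (fun e => e.1.2 == cur)).map (fun e => e.1.1)).Nodup := by
  have h1 : ((c.items.filter (fun e => e.1.2 == cur)).map (fun e => e.1)).Nodup := by
    exact (List.filter_sublist.map _).nodup hnd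
  have h2 : (c.items.filter (fun e => e.1.2 == cur)).map (fun e => e.1.1)
      = ((c.items.filter (fun e => e.1.2 == cur)).map (fun e => e.1)).map Prod.fst := by
    rw [List.map_map]; rfl
  rw [h2]
  apply h1.map_on
  intro x hx y hy hxy
  obtain ⟨ex, hex, hx1⟩ := List.mem_map.mp hx
  obtain ⟨ey, hey, hy1⟩ := List.mem_map.mp hy
  have hx2 : x.2 = cur := by
    have := (List.mem_filter.mp hex).2; rw [← hx1]; exact eq_of_beq this
  have hy2 : y.2 = cur := by
    have := (List.mem_filter.mp hey).2; rw [← hy1]; exact eq_of_beq this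
  exact Prod.ext hxy (hx2.trans hy2.symm)

lemma pvInner_items (l : List ((String × String) × Int))
    (h : (l.map (fun e => e.1.1)).Nodup) :
    (l.foldl (fun inner e => inner.insert e.1.1 e.2) (PySem.Dict.empty : PySem.Dict String Int)).items
      = l.map (fun e => (e.1.1, e.2)) := by
  have hf : (fun (inner : PySem.Dict String Int) (e : (String × String) × Int) => inner.insert e.1.1 e.2)
      = fun d a => d.insert ((fun (e : (String × String) × Int) => e.1.1) a) ((fun (e : (String × String) × Int) => e.2) a) := rfl
  rw [hf, PySem.Dict.items_foldl_insert_fresh _ _ _ _ (fun a _ => PySem.Dict.contains_empty _) h]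
  rfl

lemma pvFilterMapEq (l : List ((String × String) × Int)) (p : String × String) (v : Int) :
    ((l.map (fun q => if q.1 == p then (p, v) else q)).filter (fun e => e.1.2 == p.2))
      = (l.filter (fun e => e.1.2 == p.2)).map (fun q => if q.1 == p then (p, v) else q) := by
  rw [List.filter_map]
  simp only [Function.comp_def]
  congr 1
  apply List.filter_congr
  intro a _
  by_cases h : (a.1 == p) = true
  · simp only [h, if_true]
    have : a.1.2 = p.2 := by rw [eq_of_beq h]
    simp [this]
  · simp only [h, Bool.false_eq_true, if_false]

lemma pvFilterMapNe (l : List ((String × String) × Int)) (p : String × String) (v : Int)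
    (k : String) (hk : k ≠ p.2) :
    ((l.map (fun q => if q.1 == p then (p, v) else q)).filter (fun e => e.1.2 == k))
      = l.filter (fun e => e.1.2 == k) := by
  rw [List.filter_map]
  simp only [Function.comp_def]
  have h1 : (l.filter (fun a => ((if a.1 == p then (p, v) else a) : (String × String) × Int).1.2 == k))
      = l.filter (fun a => a.1.2 == k) := by
    apply List.filter_congr
    intro a _
    by_cases h : (a.1 == p) = true
    · simp only [h, if_true]
      have h2 : (p.2 == k) = false := beq_eq_false_iff_ne.mpr (fun hh => hk hh.symm)
      have h3 : a.1.2 = p.2 := by rw [eq_of_beq h]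
      rw [h2, h3, h2]
    · simp only [h, Bool.false_eq_true, if_false]
  rw [h1]
  have h2 : ∀ a ∈ l.filter (fun a => a.1.2 == k),
      (if a.1 == p then (p, v) else a) = a := by
    intro a ha
    have := (List.mem_filter.mp ha).2
    have hne : (a.1 == p) = false := by
      apply beq_eq_false_iff_ne.mpr
      intro hh
      apply hk
      have h3 : a.1.2 = k := eq_of_beq this
      rw [← h3, hh]
    rw [hne]; rfl
  rw [List.map_congr_left h2]; simp


lemma pvRkeys (d : PySem.Dict (String × String) Int) :
    (pvReshape d).keys = PySem.Set.ofList (d.items.map (fun e => e.1.2)) := by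
  unfold pvReshape
  rw [pvReshape_keys, PySem.Dict.keys_empty, pvSetUpdateNil]

lemma pvRgetD (d : PySem.Dict (String × String) Int) (k : String) :
    (pvReshape d).getD k PySem.Dict.empty
      = (d.items.filter (fun e => e.1.2 == k)).foldl
          (fun inner e => inner.insert e.1.1 e.2) PySem.Dict.empty := by
  unfold pvReshape
  rw [pvReshape_getD, PySem.Dict.getD_empty]

lemma pvRnodup (d : PySem.Dict (String × String) Int) : (pvReshape d).keys.Nodup := by
  unfold pvReshape
  exact pvReshape_nodup _ _ PySem.Dict.nodup_keys_empty

lemma pvKey (c : PySem.Dict (String × String) Int) (p : String × String)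
    (hnd : c.keys.Nodup) :
    pvReshape (pvPairStep c p) = pvSA (pvReshape c) p := by
  by_cases hc : c.contains p = true
  case pos =>
    obtain ⟨v, hv⟩ : ∃ v, c.get? p = some v := by
      have h := PySem.Dict.contains_eq_isSome_get? c p
      rw [hc] at h
      exact Option.isSome_iff_exists.mp h.symm
    have hm : (p, v) ∈ c.items := PySem.Dict.mem_items_of_get?_eq_some _ hv
    have hgd : c.getD p 0 = v := by rw [PySem.Dict.getD_eq_get?_getD, hv]; rfl
    have hitems : (pvPairStep c p).items
        = c.items.map (fun q => if q.1 == p then (p, v + 1) else q) := by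
      unfold pvPairStep
      rw [PySem.Dict.items_insert_of_contains _ _ hc, hgd]
    have hcur : (pvReshape c).contains p.2 = true := by
      rw [PySem.Dict.contains_iff_mem_keys, pvRkeys, PySem.Set.mem_ofList]
      exact List.mem_map.mpr ⟨(p, v), hm, rfl⟩
    have hI := pvRgetD c p.2
    have hfst := pvFstNodup c p.2 hnd
    have hIitems : ((pvReshape c).getD p.2 PySem.Dict.empty).items
        = (c.items.filter (fun e => e.1.2 == p.2)).map (fun e => (e.1.1, e.2)) := by
      rw [hI, pvInner_items _ hfst]
    have hIkeys : ((pvReshape c).getD p.2 PySem.Dict.empty).keys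
        = (c.items.filter (fun e => e.1.2 == p.2)).map (fun e => e.1.1) := by
      show ((pvReshape c).getD p.2 PySem.Dict.empty).items.map Prod.fst = _
      rw [hIitems, List.map_map]; rfl
    have hmemfc : (p, v) ∈ c.items.filter (fun e => e.1.2 == p.2) :=
      List.mem_filter.mpr ⟨hm, beq_self_eq_true p.2⟩
    have hmemI : (p.1, v) ∈ ((pvReshape c).getD p.2 PySem.Dict.empty).items := by
      rw [hIitems]; exact List.mem_map.mpr ⟨(p, v), hmemfc, rfl⟩
    have hIN : ((pvReshape c).getD p.2 PySem.Dict.empty).keys.Nodup := by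
      rw [hIkeys]; exact hfst
    have hIgd : ((pvReshape c).getD p.2 PySem.Dict.empty).getD p.1 0 = v :=
      PySem.Dict.getD_of_mem_items _ hmemI hIN 0
    have hIc : ((pvReshape c).getD p.2 PySem.Dict.empty).contains p.1 = true := by
      rw [PySem.Dict.contains_iff_mem_keys, hIkeys]
      exact List.mem_map.mpr ⟨(p, v), hmemfc, rfl⟩
    apply pvDictEq
    · exact pvRnodup _
    · rw [pvRkeys, hitems, List.map_map]
      unfold pvSA
      rw [PySem.Dict.keys_insert_of_contains _ _ hcur, pvRkeys]
      congr 1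
      apply List.map_congr_left
      intro q _
      by_cases hqp : (q.1 == p) = true
      · simp only [Function.comp_def, hqp, if_true]
        rw [eq_of_beq hqp]
      · simp only [Function.comp_def, hqp, Bool.false_eq_true, if_false]
    · intro k
      rw [pvRgetD, hitems]
      unfold pvSA
      by_cases hk : k = p.2
      · rw [hk, PySem.Dict.getD_insert_self, pvFilterMapEq, hIgd]
        have hfstmap : ((c.items.filter (fun e => e.1.2 == p.2)).map
            (fun q => if q.1 == p then (p, v + 1) else q)).map (fun e => e.1.1)
            = (c.items.filter (fun e => e.1.2 == p.2)).map (fun e => e.1.1) := by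
          rw [List.map_map]
          apply List.map_congr_left
          intro q _
          by_cases hqp : (q.1 == p) = true
          · simp only [Function.comp_def, hqp, if_true]; rw [eq_of_beq hqp]
          · simp only [Function.comp_def, hqp, Bool.false_eq_true, if_false]
        apply PySem.Dict.ext
        rw [pvInner_items _ (by rw [hfstmap]; exact hfst),
          PySem.Dict.items_insert_of_contains _ _ hIc, hIitems,
          List.map_map, List.map_map]
        apply List.map_congr_left
        intro e he
        have he2 : e.1.2 = p.2 := eq_of_beq (List.mem_filter.mp he).2
        by_cases hep : (e.1 == p) = true
        · have h1 : (e.1.1 == p.1) = true := by rw [eq_of_beq hep]; exact beq_self_eq_true p.1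
          simp only [Function.comp_def, hep, if_true, h1]
        · have h1 : (e.1.1 == p.1) = false := by
            apply beq_eq_false_iff_ne.mpr
            intro hh
            have hep2 : e.1 = p := Prod.ext hh he2
            rw [hep2] at hep
            exact hep (beq_self_eq_true p)
          simp only [Function.comp_def, hep, Bool.false_eq_true, if_false, h1]
      · rw [pvFilterMapNe _ _ _ _ hk, PySem.Dict.getD_insert_of_ne]
        · rw [pvRgetD]
        · exact hk
  case neg =>
    simp only [Bool.not_eq_true] at hc
    have hitems : (pvPairStep c p).items = c.items ++ [(p, 1)] := by
      unfold pvPairStep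
      rw [PySem.Dict.items_insert_of_not_contains _ _ hc,
        PySem.Dict.getD_of_not_contains _ _ hc]
      norm_num
    have hstep : pvReshape (pvPairStep c p) = pvSB (pvReshape c) (p, 1) := by
      unfold pvReshape
      rw [hitems, List.foldl_append]
      rfl
    rw [hstep]
    unfold pvSB pvSA
    have hmem : p.1 ∉ ((pvReshape c).getD p.2 PySem.Dict.empty).keys := by
      rw [pvRgetD, pvInner_keys, PySem.Dict.keys_empty, pvSetUpdateNil, PySem.Set.mem_ofList]
      intro hmm
      obtain ⟨e, he, he1⟩ := List.mem_map.mp hmm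
      have he2 : e.1.2 = p.2 := eq_of_beq (List.mem_filter.mp he).2
      have hep : e.1 = p := Prod.ext he1 he2
      have hct : c.contains p = true := by
        rw [PySem.Dict.contains_iff_mem_keys, ← hep]
        exact PySem.Dict.mem_keys_of_mem_items _ (List.mem_filter.mp he).1
      rw [hct] at hc
      exact Bool.true_eq_false.mp hc
    have hcf : ((pvReshape c).getD p.2 PySem.Dict.empty).contains p.1 = false := by
      rw [← Bool.not_eq_true, PySem.Dict.contains_iff_mem_keys]
      exact hmem
    rw [PySem.Dict.getD_of_not_contains _ _ hcf]
    norm_num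

lemma pvMain (ps : List (String × String)) (c : PySem.Dict (String × String) Int)
    (hnd : c.keys.Nodup) :
    pvReshape (ps.foldl pvPairStep c) = ps.foldl pvSA (pvReshape c) := by
  induction ps generalizing c with
  | nil => rfl
  | cons p ps ih =>
    rw [List.foldl_cons, List.foldl_cons, ← pvKey c p hnd]
    exact ih (pvPairStep c p) (PySem.Dict.nodup_keys_insert _ _ _ hnd)

-- ===== VERDICT (by name: the statement is the Claim_ definition above) =====
theorem count_tag_transition_occurrences_new_spec : Claim_equal_count_tag_transition_occurrences_new := by
  intro tags _
  unfold Spec_count_tag_transition_occurrences_new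
  unfold count_tag_transition_occurrences_new count_tag_transition_occurrences_new_alt
  rw [PySem.List.slice_from_one, funext (fun r => funext (fun e => pvNestStep_eq r e))]
  cases tags with
  | nil => rfl
  | cons t rest =>
    congr 1
    rw [PySem.List.enumerate_cons, List.foldl_cons]
    have h0 : pvAStep ("", "", PySem.Dict.empty) (0, t) = (t, "", PySem.Dict.empty) := rfl
    rw [h0, show (0:Int)+1 = 1 from rfl, pvA_loop rest 1 t "" PySem.Dict.empty le_rfl]
    simp only [List.tail_cons]
    have hm := pvMain ((t :: rest).zip rest) PySem.Dict.empty PySem.Dict.nodup_keys_empty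
    unfold pvReshape at hm
    rw [hm]
    rfl
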